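-- pv_equiv track=rewrite | github.com/AnishChandurkar/SynapseTaks | hermoine_spell.py | lumos
-- ===== SOURCE A (Python) =====
-- def lumos(runes):
--     has_L = has_U = has_M = has_O = has_S = 0
--
--     for i in range(len(runes)):
--         r = runes[i]
--         step = i + 1
--         ch = r.upper()
--
--         if ch == 'L':
--             has_L = 1
--         elif ch == 'U':
--             has_U = 1
--         elif ch == 'M':
--             has_M = 1
--         elif ch == 'O':
--             has_O = 1
--         elif ch == 'S':
--             has_S = 1
--
--         if has_L and has_U and has_M and has_O and has_S:
--             return step
--
--     return -1
-- ===== SOURCE B (Python) =====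
-- def lumos(runes):
--     up = [r.upper() for r in runes]
--
--     def first_at(c):
--         for i, ch in enumerate(up):
--             if ch == c:
--                 return i
--         return None
--
--     idxs = [first_at(c) for c in "LUMOS"]
--     if None in idxs:
--         return -1
--     return max(idxs) + 1
-- ===== Notes on version B (the rewrite author's own statement) =====
-- stated objective: alternative
-- what changed: Replaces the incremental five-flag early-exit scan by collecting each LUMOS letter's first-occurrence index and reducing with max(+1), returning -1 if any letter is absent.
import Mathlib
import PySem

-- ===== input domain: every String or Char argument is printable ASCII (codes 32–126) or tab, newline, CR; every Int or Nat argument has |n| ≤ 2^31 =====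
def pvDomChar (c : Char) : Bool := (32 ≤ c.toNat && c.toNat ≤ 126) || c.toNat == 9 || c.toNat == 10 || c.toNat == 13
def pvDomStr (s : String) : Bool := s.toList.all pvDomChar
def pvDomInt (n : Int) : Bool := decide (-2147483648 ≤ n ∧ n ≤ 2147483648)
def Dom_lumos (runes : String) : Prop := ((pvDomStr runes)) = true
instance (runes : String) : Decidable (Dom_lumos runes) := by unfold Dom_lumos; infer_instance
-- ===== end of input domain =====

-- B replaces A's incremental five-flag early-exit scan by first-occurrence indices per letter reduced with max(+1); alternative decomposition, same cost.

-- ===== PORT A =====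
-- the indexed for-loop of A, carrying the five flags; the elif chain is kept in order
def lumosLoop : List Char → Nat → Bool → Bool → Bool → Bool → Bool → Int
  | [], _, _, _, _, _, _ => -1
  | r :: rest, i, hL, hU, hM, hO, hS =>
    let ch := PySem.Chars.upperChar r
    let hL := if ch == 'L' then true else hL
    let hU := if ch == 'L' then hU else if ch == 'U' then true else hU
    let hM := if ch == 'L' || ch == 'U' then hM else if ch == 'M' then true else hM
    let hO := if ch == 'L' || ch == 'U' || ch == 'M' then hO else if ch == 'O' then true else hO
    let hS := if ch == 'L' || ch == 'U' || ch == 'M' || ch == 'O' then hS else if ch == 'S' then true else hS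
    if hL && hU && hM && hO && hS then ((i + 1 : Nat) : Int)
    else lumosLoop rest (i + 1) hL hU hM hO hS

def lumos (runes : String) : Int :=
  lumosLoop runes.toList 0 false false false false false

-- ===== PORT B =====
-- first_at: index of the first occurrence of c in the uppercased rune list (None if absent)
def lumosFirstAt (us : List Char) (c : Char) : Option Nat :=
  us.findIdx? (· == c)

def lumos_alt (runes : String) : Int :=
  let us := runes.toList.map PySem.Chars.upperChar
  match lumosFirstAt us 'L', lumosFirstAt us 'U', lumosFirstAt us 'M',
        lumosFirstAt us 'O', lumosFirstAt us 'S' with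
  | some a, some b, some c, some d, some e =>
      ((max a (max b (max c (max d e))) + 1 : Nat) : Int)
  | _, _, _, _, _ => -1

-- ===== PRECONDITION & SPEC =====
def Spec_lumos (runes : String) (out : Int) : Prop := out = lumos_alt runes
instance (runes : String) (out : Int) : Decidable (Spec_lumos runes out) := by unfold Spec_lumos; infer_instance

-- ===== CLAIM (what is proved, stated in full; the proofs are below) =====
def Claim_equal_lumos : Prop := ∀ (runes : String), Dom_lumos runes → Spec_lumos runes (lumos runes)

-- ===== LEMMAS AND PROOFS =====

-- reduce five first-occurrence options to A's answer shape
def lumosMk (i : Nat) : Option Nat → Option Nat → Option Nat → Option Nat → Option Nat → Int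
  | some a, some b, some c, some d, some e =>
      ((i + 1 + max a (max b (max c (max d e))) : Nat) : Int)
  | _, _, _, _, _ => -1

-- first occurrence of letter c in the uppercased list, pre-loaded with flag b (already seen ↦ 0)
def lumosFo (b : Bool) (c : Char) (cs : List Char) : Option Nat :=
  if b then some 0 else (cs.map PySem.Chars.upperChar).findIdx? (· == c)

def lumosCombo (i : Nat) (bL bU bM bO bS : Bool) (cs : List Char) : Int :=
  lumosMk i (lumosFo bL 'L' cs) (lumosFo bU 'U' cs) (lumosFo bM 'M' cs)
            (lumosFo bO 'O' cs) (lumosFo bS 'S' cs)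

set_option maxHeartbeats 1000000 in
theorem lumosMk_step (i : Nat) (oa ob oc od oe pa pb pc pd pe : Option Nat)
    (ha : (oa = some 0 ∧ pa = some 0) ∨ oa = pa.map (· + 1))
    (hb : (ob = some 0 ∧ pb = some 0) ∨ ob = pb.map (· + 1))
    (hc : (oc = some 0 ∧ pc = some 0) ∨ oc = pc.map (· + 1))
    (hd : (od = some 0 ∧ pd = some 0) ∨ od = pd.map (· + 1))
    (he : (oe = some 0 ∧ pe = some 0) ∨ oe = pe.map (· + 1))
    (hone : oa = pa.map (· + 1) ∨ ob = pb.map (· + 1) ∨ oc = pc.map (· + 1) ∨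
            od = pd.map (· + 1) ∨ oe = pe.map (· + 1)) :
    lumosMk i oa ob oc od oe = lumosMk (i + 1) pa pb pc pd pe := by
  rcases ha with ⟨rfl, rfl⟩ | rfl <;> rcases hb with ⟨rfl, rfl⟩ | rfl <;>
    rcases hc with ⟨rfl, rfl⟩ | rfl <;> rcases hd with ⟨rfl, rfl⟩ | rfl <;>
    rcases he with ⟨rfl, rfl⟩ | rfl <;>
    (try cases pa) <;> (try cases pb) <;> (try cases pc) <;> (try cases pd) <;> (try cases pe) <;>
    simp_all [lumosMk] <;> omega

-- how one loop step transforms a letter's flagged first occurrence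
theorem lumosFo_cons_rel (b : Bool) (c r : Char) (rest : List Char) :
    ((b || (PySem.Chars.upperChar r == c)) = true ∧
      lumosFo b c (r :: rest) = some 0 ∧
      lumosFo (b || (PySem.Chars.upperChar r == c)) c rest = some 0) ∨
    ((b || (PySem.Chars.upperChar r == c)) = false ∧
      lumosFo b c (r :: rest) =
        (lumosFo (b || (PySem.Chars.upperChar r == c)) c rest).map (· + 1)) := by
  by_cases hb : b = true
  · left; simp [lumosFo, hb]
  · by_cases hc : PySem.Chars.upperChar r = c
    · simp only [Bool.not_eq_true] at hb
      left; simp [lumosFo, List.findIdx?_cons, hb, hc]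
    · right
      simp only [Bool.not_eq_true] at hb
      simp [lumosFo, List.findIdx?_cons, hb, hc]

-- A's elif chain sets exactly the flag of the matched letter: parallel-or form of one step
theorem lumosLoop_cons (r : Char) (rest : List Char) (i : Nat) (bL bU bM bO bS : Bool) :
    lumosLoop (r :: rest) i bL bU bM bO bS =
      if (bL || (PySem.Chars.upperChar r == 'L')) && (bU || (PySem.Chars.upperChar r == 'U')) &&
         (bM || (PySem.Chars.upperChar r == 'M')) && (bO || (PySem.Chars.upperChar r == 'O')) &&
         (bS || (PySem.Chars.upperChar r == 'S'))
      then ((i + 1 : Nat) : Int)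
      else lumosLoop rest (i + 1)
            (bL || (PySem.Chars.upperChar r == 'L')) (bU || (PySem.Chars.upperChar r == 'U'))
            (bM || (PySem.Chars.upperChar r == 'M')) (bO || (PySem.Chars.upperChar r == 'O'))
            (bS || (PySem.Chars.upperChar r == 'S')) := by
  by_cases h1 : PySem.Chars.upperChar r = 'L'
  · simp [lumosLoop, h1]
  · by_cases h2 : PySem.Chars.upperChar r = 'U'
    · simp [lumosLoop, h1, h2]
    · by_cases h3 : PySem.Chars.upperChar r = 'M'
      · simp [lumosLoop, h1, h2, h3]
      · by_cases h4 : PySem.Chars.upperChar r = 'O'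
        · simp [lumosLoop, h1, h2, h3, h4]
        · by_cases h5 : PySem.Chars.upperChar r = 'S'
          · simp [lumosLoop, h1, h2, h3, h4, h5, beq_eq_false_iff_ne]
          · have e1 : (PySem.Chars.upperChar r == 'L') = false := by simp [h1]
            have e2 : (PySem.Chars.upperChar r == 'U') = false := by simp [h2]
            have e3 : (PySem.Chars.upperChar r == 'M') = false := by simp [h3]
            have e4 : (PySem.Chars.upperChar r == 'O') = false := by simp [h4]
            have e5 : (PySem.Chars.upperChar r == 'S') = false := by simp [h5]
            simp [lumosLoop, e1, e2, e3, e4, e5]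

theorem lumosLoop_eq_combo (cs : List Char) : ∀ (i : Nat) (bL bU bM bO bS : Bool),
    (bL && bU && bM && bO && bS) = false →
    lumosLoop cs i bL bU bM bO bS = lumosCombo i bL bU bM bO bS cs := by
  induction cs with
  | nil =>
    intro i bL bU bM bO bS hne
    cases bL <;> cases bU <;> cases bM <;> cases bO <;> cases bS <;>
      simp_all [lumosLoop, lumosCombo, lumosFo, lumosMk]
  | cons r rest ih =>
    intro i bL bU bM bO bS hne
    rw [lumosLoop_cons]
    have rL := lumosFo_cons_rel bL 'L' r rest
    have rU := lumosFo_cons_rel bU 'U' r rest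
    have rM := lumosFo_cons_rel bM 'M' r rest
    have rO := lumosFo_cons_rel bO 'O' r rest
    have rS := lumosFo_cons_rel bS 'S' r rest
    by_cases hall : ((bL || (PySem.Chars.upperChar r == 'L')) && (bU || (PySem.Chars.upperChar r == 'U')) &&
        (bM || (PySem.Chars.upperChar r == 'M')) && (bO || (PySem.Chars.upperChar r == 'O')) &&
        (bS || (PySem.Chars.upperChar r == 'S'))) = true
    · rw [if_pos hall]
      simp only [Bool.and_eq_true] at hall
      obtain ⟨⟨⟨⟨aL, aU⟩, aM⟩, aO⟩, aS⟩ := hall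
      have eL : lumosFo bL 'L' (r :: rest) = some 0 := by
        rcases rL with ⟨_, h, _⟩ | ⟨hf, _⟩
        · exact h
        · simp [hf] at aL
      have eU : lumosFo bU 'U' (r :: rest) = some 0 := by
        rcases rU with ⟨_, h, _⟩ | ⟨hf, _⟩
        · exact h
        · simp [hf] at aU
      have eM : lumosFo bM 'M' (r :: rest) = some 0 := by
        rcases rM with ⟨_, h, _⟩ | ⟨hf, _⟩
        · exact h
        · simp [hf] at aM
      have eO : lumosFo bO 'O' (r :: rest) = some 0 := by
        rcases rO with ⟨_, h, _⟩ | ⟨hf, _⟩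
        · exact h
        · simp [hf] at aO
      have eS : lumosFo bS 'S' (r :: rest) = some 0 := by
        rcases rS with ⟨_, h, _⟩ | ⟨hf, _⟩
        · exact h
        · simp [hf] at aS
      unfold lumosCombo
      rw [eL, eU, eM, eO, eS]
      simp [lumosMk]
    · rw [if_neg hall]
      have hall' : ((bL || (PySem.Chars.upperChar r == 'L')) && (bU || (PySem.Chars.upperChar r == 'U')) &&
          (bM || (PySem.Chars.upperChar r == 'M')) && (bO || (PySem.Chars.upperChar r == 'O')) &&
          (bS || (PySem.Chars.upperChar r == 'S'))) = false := by
        simpa using hall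
      rw [ih (i + 1) _ _ _ _ _ hall']
      have hone : lumosFo bL 'L' (r :: rest) = (lumosFo (bL || (PySem.Chars.upperChar r == 'L')) 'L' rest).map (· + 1) ∨
          lumosFo bU 'U' (r :: rest) = (lumosFo (bU || (PySem.Chars.upperChar r == 'U')) 'U' rest).map (· + 1) ∨
          lumosFo bM 'M' (r :: rest) = (lumosFo (bM || (PySem.Chars.upperChar r == 'M')) 'M' rest).map (· + 1) ∨
          lumosFo bO 'O' (r :: rest) = (lumosFo (bO || (PySem.Chars.upperChar r == 'O')) 'O' rest).map (· + 1) ∨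
          lumosFo bS 'S' (r :: rest) = (lumosFo (bS || (PySem.Chars.upperChar r == 'S')) 'S' rest).map (· + 1) := by
        simp only [Bool.and_eq_false_iff] at hall'
        rcases hall' with ((((h | h) | h) | h) | h)
        · refine Or.inl ?_
          rcases rL with ⟨ht, _, _⟩ | ⟨_, hm⟩
          · rw [h] at ht; exact (Bool.false_ne_true ht).elim
          · exact hm
        · refine Or.inr (Or.inl ?_)
          rcases rU with ⟨ht, _, _⟩ | ⟨_, hm⟩
          · rw [h] at ht; exact (Bool.false_ne_true ht).elim
          · exact hm
        · refine Or.inr (Or.inr (Or.inl ?_))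
          rcases rM with ⟨ht, _, _⟩ | ⟨_, hm⟩
          · rw [h] at ht; exact (Bool.false_ne_true ht).elim
          · exact hm
        · refine Or.inr (Or.inr (Or.inr (Or.inl ?_)))
          rcases rO with ⟨ht, _, _⟩ | ⟨_, hm⟩
          · rw [h] at ht; exact (Bool.false_ne_true ht).elim
          · exact hm
        · refine Or.inr (Or.inr (Or.inr (Or.inr ?_)))
          rcases rS with ⟨ht, _, _⟩ | ⟨_, hm⟩
          · rw [h] at ht; exact (Bool.false_ne_true ht).elim
          · exact hm
      unfold lumosCombo
      exact (lumosMk_step i _ _ _ _ _ _ _ _ _ _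
        (rL.imp (fun h => ⟨h.2.1, h.2.2⟩) And.right)
        (rU.imp (fun h => ⟨h.2.1, h.2.2⟩) And.right)
        (rM.imp (fun h => ⟨h.2.1, h.2.2⟩) And.right)
        (rO.imp (fun h => ⟨h.2.1, h.2.2⟩) And.right)
        (rS.imp (fun h => ⟨h.2.1, h.2.2⟩) And.right)
        hone).symm

-- ===== VERDICT (by name: the statement is the Claim_ definition above) =====
theorem lumos_spec : Claim_equal_lumos := by
  intro runes _
  unfold Spec_lumos lumos lumos_alt
  rw [lumosLoop_eq_combo runes.toList 0 false false false false false rfl]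
  unfold lumosCombo lumosFo lumosFirstAt
  simp only [Bool.false_eq_true, if_false]
  cases h1 : (runes.toList.map PySem.Chars.upperChar).findIdx? (· == 'L') <;>
  cases h2 : (runes.toList.map PySem.Chars.upperChar).findIdx? (· == 'U') <;>
  cases h3 : (runes.toList.map PySem.Chars.upperChar).findIdx? (· == 'M') <;>
  cases h4 : (runes.toList.map PySem.Chars.upperChar).findIdx? (· == 'O') <;>
  cases h5 : (runes.toList.map PySem.Chars.upperChar).findIdx? (· == 'S') <;>
    simp [lumosMk] <;> omega
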